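-- pv_equiv track=rewrite | github.com/bomzj/automation-tools-for-linkedin-and-emails | send_emails.py | most_relevant_email_or_default
-- ===== SOURCE A (Python) =====
-- def most_relevant_email_or_default(emails, keywords):
--     # Handle empty emails list
--     if not emails:
--         return None
--
--     # Define scoring function
--     def score(email):
--         # Extract prefix (part before '@')
--         prefix = email.split('@')[0]
--
--         # Check each keyword in order
--         for i, keyword in enumerate(keywords):
--
--             # If keyword is a substring of the prefix, return its index
--             if keyword in prefix:
--                 return i
--
--         # If no keyword matches, return length of keywords
--         return len(keywords)
--
--     # Return email with the smallest score
--     return min(emails, key=score)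
-- ===== SOURCE B (Python) =====
-- def most_relevant_email_or_default(emails, keywords):
--     if not emails:
--         return None
--     # Keyword-major scan: keywords are in priority order, so the first keyword
--     # that matches any email prefix decides; among those, the first email wins.
--     for keyword in keywords:
--         for email in emails:
--             if keyword in email.split('@')[0]:
--                 return email
--     # No keyword matches any email: fall back to the first email.
--     return emails[0]
-- ===== Notes on version B (the rewrite author's own statement) =====
-- stated objective: faster
-- what changed: Replaced the per-email scoring function plus min(emails, key=score) with a keyword-major nested scan that early-returns the first email whose prefix contains the highest-priority matching keyword (falling back to emails[0]), so it stops at the first match instead of always scoring every email against every keyword.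
import Mathlib
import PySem

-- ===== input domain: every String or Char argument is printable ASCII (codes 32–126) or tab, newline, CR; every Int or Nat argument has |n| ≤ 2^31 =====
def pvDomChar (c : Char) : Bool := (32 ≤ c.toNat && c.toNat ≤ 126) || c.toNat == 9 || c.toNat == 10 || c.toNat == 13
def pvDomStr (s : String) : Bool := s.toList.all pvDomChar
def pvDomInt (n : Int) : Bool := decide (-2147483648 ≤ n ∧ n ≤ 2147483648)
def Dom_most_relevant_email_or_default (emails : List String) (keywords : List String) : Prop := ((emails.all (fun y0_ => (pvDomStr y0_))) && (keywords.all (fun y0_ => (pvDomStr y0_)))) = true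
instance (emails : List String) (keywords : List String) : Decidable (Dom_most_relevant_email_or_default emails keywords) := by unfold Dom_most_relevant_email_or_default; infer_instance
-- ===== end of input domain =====

-- B replaces A's per-email scoring + min(emails, key=score) with a keyword-major
-- nested scan that early-returns at the first match (measured faster in a timing run).

-- ===== PORT A =====
-- email.split('@')[0]: split with the nonempty separator '@' always returns a
-- nonempty list, so the getD/headD defaults are never reached.
def pvPrefix (email : String) : String :=
  ((PySem.Str.split? email "@").getD []).headD ""

-- the 'for i, keyword in enumerate(keywords)' loop of score, with the
-- fallthrough value len(keywords) as fb
def pvScoreLoop (pre : String) (fb : Int) : List (Int × String) → Int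
  | [] => fb
  | (i, kw) :: t => if PySem.Str.isIn kw pre then i else pvScoreLoop pre fb t

def pvScore (keywords : List String) (email : String) : Int :=
  pvScoreLoop (pvPrefix email) (keywords.length : Int) (PySem.List.enumerate keywords 0)

def most_relevant_email_or_default (emails : List String) (keywords : List String) : Option String :=
  if emails = [] then none
  else PySem.List.min? emails (pvScore keywords)

-- ===== PORT B =====
-- outer 'for keyword in keywords' loop; the inner 'for email in emails' scan
-- with early return is List.find?
def pvKwLoop (emails : List String) (e0 : String) : List String → Option String
  | [] => some e0
  | kw :: t =>
    match emails.find? (fun e => PySem.Str.isIn kw (pvPrefix e)) with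
    | some e => some e
    | none => pvKwLoop emails e0 t

def most_relevant_email_or_default_alt (emails : List String) (keywords : List String) : Option String :=
  match emails with
  | [] => none
  | e0 :: _ => pvKwLoop emails e0 keywords

-- ===== PRECONDITION & SPEC =====
def Spec_most_relevant_email_or_default (emails : List String) (keywords : List String) (out : Option String) : Prop := out = most_relevant_email_or_default_alt emails keywords
instance (emails : List String) (keywords : List String) (out : Option String) : Decidable (Spec_most_relevant_email_or_default emails keywords out) := by unfold Spec_most_relevant_email_or_default; infer_instance

-- ===== CLAIM (what is proved, stated in full; the proofs are below) =====
def Claim_equal_most_relevant_email_or_default : Prop := ∀ (emails : List String) (keywords : List String), Dom_most_relevant_email_or_default emails keywords → Spec_most_relevant_email_or_default emails keywords (most_relevant_email_or_default emails keywords)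

-- ===== LEMMAS AND PROOFS =====

-- running first-minimum of A's min? fold, with accumulator m
def pvMinFrom (key : String → Int) (m : String) : List String → String
  | [] => m
  | x :: t => pvMinFrom key (if key x < key m then x else m) t

theorem pvMin?_step (key : String → Int) (e0 x : String) (t : List String) :
    PySem.List.min? (e0 :: x :: t) key
      = PySem.List.min? ((if key x < key e0 then x else e0) :: t) key := by
  simp only [PySem.List.min?, List.foldl]
  split_ifs <;> rfl

theorem pvMin?_cons (key : String → Int) (e0 : String) (es : List String) :
    PySem.List.min? (e0 :: es) key = some (pvMinFrom key e0 es) := by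
  induction es generalizing e0 with
  | nil => rfl
  | cons x t ih =>
    rw [pvMin?_step]
    simp only [pvMinFrom]
    exact ih _

-- structural version of A's score (index of first matching keyword, else length)
def pvPure (pre : String) : List String → Int
  | [] => 0
  | kw :: t => if PySem.Str.isIn kw pre then 0 else 1 + pvPure pre t

theorem pvPure_nonneg (pre : String) (kws : List String) : 0 ≤ pvPure pre kws := by
  induction kws with
  | nil => simp [pvPure]
  | cons kw t ih => simp only [pvPure]; split <;> omega

theorem pvScoreLoop_enum (pre : String) (kws : List String) (s : Int) :
    pvScoreLoop pre (s + (kws.length : Int)) (PySem.List.enumerate kws s)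
      = s + pvPure pre kws := by
  induction kws generalizing s with
  | nil => simp [pvScoreLoop, pvPure, PySem.List.enumerate_nil]
  | cons kw t ih =>
    rw [PySem.List.enumerate_cons]
    simp only [pvScoreLoop, pvPure]
    split
    · omega
    · have h := ih (s + 1)
      have hlen : s + ((kw :: t).length : Int) = (s + 1) + (t.length : Int) := by
        simp; omega
      rw [hlen, h]; omega

theorem pvScore_eq_pure (kws : List String) (e : String) :
    pvScore kws e = pvPure (pvPrefix e) kws := by
  have h := pvScoreLoop_enum (pvPrefix e) kws 0
  simpa [pvScore] using h

-- accumulator stays the minimum: no later element beats it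
theorem pvMinFrom_of_min (key : String → Int) (m : String) (suf : List String)
    (h : ∀ s ∈ suf, key m ≤ key s) : pvMinFrom key m suf = m := by
  induction suf with
  | nil => rfl
  | cons s t ih =>
    simp only [pvMinFrom]
    have hs := h s (List.mem_cons_self)
    rw [if_neg (by omega)]
    exact ih (fun x hx => h x (List.mem_cons_of_mem _ hx))

-- the first element of strictly-smallest key wins the fold
theorem pvMinFrom_first (key : String → Int) (m : String) (suf : List String)
    (hsuf : ∀ s ∈ suf, key m ≤ key s) :
    ∀ (pre : List String) (a : String), key m < key a → (∀ p ∈ pre, key m < key p) →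
    pvMinFrom key a (pre ++ m :: suf) = m := by
  intro pre
  induction pre with
  | nil =>
    intro a ha _
    simp only [List.nil_append, pvMinFrom]
    rw [if_pos ha]
    exact pvMinFrom_of_min key m suf hsuf
  | cons p t ih =>
    intro a ha hpre
    simp only [List.cons_append, pvMinFrom]
    have hp := hpre p (List.mem_cons_self)
    split
    · exact ih p hp (fun x hx => hpre x (List.mem_cons_of_mem _ hx))
    · exact ih a ha (fun x hx => hpre x (List.mem_cons_of_mem _ hx))

-- when no element matches kw, every key is 1 + the tail key: the fold's choice is unchanged
theorem pvMinFrom_shift (key2 : String → Int) (kw : String) :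
    ∀ (xs : List String) (a : String),
    (∀ e ∈ a :: xs, PySem.Str.isIn kw (pvPrefix e) = false) →
    pvMinFrom (fun e => if PySem.Str.isIn kw (pvPrefix e) then 0 else 1 + key2 e) a xs
      = pvMinFrom key2 a xs := by
  intro xs
  induction xs with
  | nil => intro a _; rfl
  | cons x t ih =>
    intro a h
    have ha := h a List.mem_cons_self
    have hx := h x (List.mem_cons_of_mem _ List.mem_cons_self)
    have hx' : ∀ e ∈ x :: t, PySem.Str.isIn kw (pvPrefix e) = false :=
      fun e he => h e (List.mem_cons_of_mem _ he)
    have ha' : ∀ e ∈ a :: t, PySem.Str.isIn kw (pvPrefix e) = false := by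
      intro e he
      cases List.mem_cons.mp he with
      | inl h1 => subst h1; exact ha
      | inr h2 => exact h e (List.mem_cons_of_mem _ (List.mem_cons_of_mem _ h2))
    have ex : (if PySem.Str.isIn kw (pvPrefix x) then (0 : Int) else 1 + key2 x) = 1 + key2 x := by
      rw [hx]; simp
    have ea : (if PySem.Str.isIn kw (pvPrefix a) then (0 : Int) else 1 + key2 a) = 1 + key2 a := by
      rw [ha]; simp
    simp only [pvMinFrom]
    simp only [ex, ea]
    by_cases hlt : key2 x < key2 a
    · rw [if_pos (by omega), if_pos hlt]
      exact ih x hx'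
    · rw [if_neg (by omega), if_neg hlt]
      exact ih a ha'

theorem pvMain (kws : List String) (e0 : String) (es : List String) :
    some (pvMinFrom (fun e => pvPure (pvPrefix e) kws) e0 es)
      = pvKwLoop (e0 :: es) e0 kws := by
  induction kws with
  | nil =>
    simp only [pvKwLoop]
    rw [pvMinFrom_of_min _ e0 es (by intro s _; simp [pvPure])]
  | cons kw t ih =>
    simp only [pvKwLoop]
    cases hfind : List.find? (fun e => PySem.Str.isIn kw (pvPrefix e)) (e0 :: es) with
    | some m =>
      rw [List.find?_eq_some_iff_append] at hfind
      obtain ⟨hm, l1, l2, hsplit, hl1⟩ := hfind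
      have keym : pvPure (pvPrefix m) (kw :: t) = 0 := by
        simp only [pvPure]; rw [if_pos hm]
      have keyp : ∀ p, (!PySem.Str.isIn kw (pvPrefix p)) = true →
          pvPure (pvPrefix m) (kw :: t) < pvPure (pvPrefix p) (kw :: t) := by
        intro p hp
        have hp' : PySem.Str.isIn kw (pvPrefix p) = false := by
          rwa [Bool.not_eq_true'] at hp
        rw [keym]
        simp only [pvPure]
        rw [if_neg (by rw [hp']; exact Bool.false_ne_true)]
        have := pvPure_nonneg (pvPrefix p) t
        omega
      have keys : ∀ s, pvPure (pvPrefix m) (kw :: t) ≤ pvPure (pvPrefix s) (kw :: t) := by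
        intro s
        rw [keym]
        simp only [pvPure]
        have := pvPure_nonneg (pvPrefix s) t
        split <;> omega
      cases l1 with
      | nil =>
        simp only [List.nil_append, List.cons.injEq] at hsplit
        obtain ⟨he0, hes⟩ := hsplit
        rw [he0, hes, pvMinFrom_of_min _ m l2 (fun s _ => keys s)]
      | cons p1 t1 =>
        simp only [List.cons_append, List.cons.injEq] at hsplit
        obtain ⟨he0, hes⟩ := hsplit
        rw [← he0] at hl1
        rw [hes, pvMinFrom_first _ m l2 (fun s _ => keys s) t1 e0
          (keyp e0 (hl1 e0 List.mem_cons_self))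
          (fun p hp => keyp p (hl1 p (List.mem_cons_of_mem _ hp)))]
    | none =>
      rw [List.find?_eq_none] at hfind
      have hnone : ∀ e ∈ e0 :: es, PySem.Str.isIn kw (pvPrefix e) = false := by
        intro e he
        cases hbb : PySem.Str.isIn kw (pvPrefix e) with
        | false => rfl
        | true => exact absurd hbb (hfind e he)
      have hkey : (fun e => pvPure (pvPrefix e) (kw :: t))
          = (fun e => if PySem.Str.isIn kw (pvPrefix e) then 0 else 1 + pvPure (pvPrefix e) t) := by
        funext e; simp only [pvPure]
      rw [hkey, pvMinFrom_shift (fun e => pvPure (pvPrefix e) t) kw es e0 hnone, ih]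

-- ===== VERDICT (by name: the statement is the Claim_ definition above) =====
theorem most_relevant_email_or_default_spec : Claim_equal_most_relevant_email_or_default := by
  intro emails keywords _
  unfold Spec_most_relevant_email_or_default most_relevant_email_or_default most_relevant_email_or_default_alt
  cases emails with
  | nil => simp
  | cons e0 es =>
    rw [if_neg (by simp)]
    have hkey : pvScore keywords = fun e => pvPure (pvPrefix e) keywords :=
      funext fun e => pvScore_eq_pure keywords e
    rw [hkey, pvMin?_cons]
    exact pvMain keywords e0 es
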